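-- pv_equiv track=rewrite | github.com/shengrihui/Leetcode | Temp/leetcode/editor/cn/[2560]打家劫舍 IV.py | minCapability
-- ===== SOURCE A (Python) =====
-- from typing import List
--
-- def minCapability(nums: List[int], k: int) -> int:
--     def check(mid):
--         f0 = f1 = 0
--         for x in nums:
--             if x <= mid:
--                 f0, f1 = f1, max(f0 + 1, f1)
--             else:
--                 f0 = f1
--             if f1 >= k:
--                 return False
--         return True
--
--     l, r = min(nums), max(nums)
--     while l <= r:
--         mid = (l + r) // 2
--         if check(mid):
--             l = mid + 1
--         else:
--             r = mid - 1
--     return l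
-- ===== SOURCE B (Python) =====
-- from typing import List
--
-- def minCapability(nums: List[int], k: int) -> int:
--     # Half-open lower-bound binary search over [min, max+1) on the predicate
--     # "at least k houses with value <= cap can be robbed", tested by a greedy
--     # full scan with a skip flag (take every affordable house, skip its
--     # neighbour) instead of the f0/f1 DP with early exit.
--     def can_rob(cap):
--         count = 0
--         skip = False
--         for x in nums:
--             if skip:
--                 skip = False
--             elif x <= cap:
--                 count += 1
--                 skip = True
--         return count >= k
--
--     lo, hi = min(nums), max(nums) + 1
--     while lo < hi:
--         mid = (lo + hi) // 2
--         if can_rob(mid):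
--             hi = mid
--         else:
--             lo = mid + 1
--     return lo
-- ===== Notes on version B (the rewrite author's own statement) =====
-- stated objective: faster
-- what changed: The closed-interval l/r binary search with the f0/f1 house-robber DP feasibility test is replaced by a half-open lower-bound binary search over [min, max+1) whose feasibility test is a greedy skip-flag scan counting affordable houses.
-- outside the precondition, e.g. on minCapability([], 3): A raises ValueError, B raises ValueError
import Mathlib
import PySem

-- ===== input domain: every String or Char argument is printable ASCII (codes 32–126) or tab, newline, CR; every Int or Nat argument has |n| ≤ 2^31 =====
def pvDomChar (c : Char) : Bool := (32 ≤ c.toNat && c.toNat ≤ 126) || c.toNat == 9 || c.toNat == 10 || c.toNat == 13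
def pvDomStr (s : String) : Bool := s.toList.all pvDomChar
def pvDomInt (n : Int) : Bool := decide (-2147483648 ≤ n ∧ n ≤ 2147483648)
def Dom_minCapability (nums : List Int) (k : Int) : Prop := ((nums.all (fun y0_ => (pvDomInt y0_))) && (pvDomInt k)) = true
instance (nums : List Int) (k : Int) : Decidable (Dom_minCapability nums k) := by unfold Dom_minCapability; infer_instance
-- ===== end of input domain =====

-- B replaces A's closed-interval binary search + f0/f1 house-robber DP test by a
-- half-open lower-bound binary search over [min, max+1) with a greedy skip-flag
-- counting scan (same asymptotics; measurably faster by a constant factor).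


-- ===== PORT A =====
-- A's check(mid): f0/f1 DP over nums with early False once f1 >= k
def checkAgo (mid k : Int) : List Int → Int → Int → Bool
  | [], _, _ => true
  | x :: xs, f0, f1 =>
    let p : Int × Int := if x ≤ mid then (f1, max (f0 + 1) f1) else (f1, f1)
    if k ≤ p.2 then false else checkAgo mid k xs p.1 p.2

def checkA (nums : List Int) (k mid : Int) : Bool := checkAgo mid k nums 0 0

-- A's binary-search while loop (closed interval, l ≤ r)
def loopA (nums : List Int) (k l r : Int) : Int :=
  if h : l ≤ r then
    let mid := PySem.Int.floordiv (l + r) 2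
    if checkA nums k mid then loopA nums k (mid + 1) r else loopA nums k l (mid - 1)
  else l
termination_by (r + 1 - l).toNat
decreasing_by
  · have := PySem.Int.floordiv_two_mid_bounds h; omega
  · have := PySem.Int.floordiv_two_mid_bounds h; omega

def minCapability (nums : List Int) (k : Int) : Int :=
  match PySem.List.min? nums (fun x => x), PySem.List.max? nums (fun x => x) with
  | some l, some r => loopA nums k l r
  | _, _ => 0  -- unreachable under Pre_: Python's min() raises ValueError on []

-- ===== PORT B =====
-- B's can_rob(cap): greedy counting scan with a skip flag, no early exit
def canRobGo (cap : Int) : List Int → Bool → Int → Int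
  | [], _, c => c
  | x :: xs, skip, c =>
    if skip then canRobGo cap xs false c
    else if x ≤ cap then canRobGo cap xs true (c + 1)
    else canRobGo cap xs false c

def canRob (nums : List Int) (k cap : Int) : Bool := decide (k ≤ canRobGo cap nums false 0)

-- B's lower-bound binary search over the half-open interval [lo, hi)
def loopB (nums : List Int) (k lo hi : Int) : Int :=
  if h : lo < hi then
    let mid := PySem.Int.floordiv (lo + hi) 2
    if canRob nums k mid then loopB nums k lo mid else loopB nums k (mid + 1) hi
  else lo
termination_by (hi - lo).toNat
decreasing_by
  · have h1 : lo * 2 ≤ lo + hi := by omega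
    have := (PySem.Int.le_floordiv_iff_mul_le (a := lo + hi) (b := 2) (q := lo) (by omega)).mpr h1
    have h2 : lo + hi < hi * 2 := by omega
    have := (PySem.Int.floordiv_lt_iff_lt_mul (a := lo + hi) (b := 2) (q := hi) (by omega)).mpr h2
    omega
  · have h1 : lo * 2 ≤ lo + hi := by omega
    have := (PySem.Int.le_floordiv_iff_mul_le (a := lo + hi) (b := 2) (q := lo) (by omega)).mpr h1
    omega

def minCapability_alt (nums : List Int) (k : Int) : Int :=
  match PySem.List.min? nums (fun x => x) with
  | none => 0  -- unreachable under Pre_: Python's min() raises ValueError on []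
  | some lo =>
    match PySem.List.max? nums (fun x => x) with
    | none => 0
    | some mx => loopB nums k lo (mx + 1)

-- ===== PRECONDITION & SPEC =====
-- Pre_ excludes only the empty list, on which Python's min()/max() raise ValueError.
def Pre_minCapability (nums : List Int) (k : Int) : Prop := nums ≠ []
instance (nums : List Int) (k : Int) : Decidable (Pre_minCapability nums k) := by
  unfold Pre_minCapability; infer_instance

def pvWitness_minCapability : List Int × Int := ([2, 3, 5, 9], 2)

def Spec_minCapability (nums : List Int) (k : Int) (out : Int) : Prop := out = minCapability_alt nums k
instance (nums : List Int) (k : Int) (out : Int) : Decidable (Spec_minCapability nums k out) := by unfold Spec_minCapability; infer_instance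

-- ===== CLAIM (what is proved, stated in full; the proofs are below) =====
def Claim_equal_minCapability : Prop := ∀ (nums : List Int) (k : Int), Dom_minCapability nums k → Pre_minCapability nums k → Spec_minCapability nums k (minCapability nums k)

-- ===== LEMMAS AND PROOFS =====

-- greedy count of robbable houses with value ≤ mid, as a pure value
def mg (mid : Int) : List Int → Int
  | [] => 0
  | x :: xs => if x ≤ mid then 1 + mg mid xs.tail else mg mid xs
termination_by xs => xs.length
decreasing_by
  · cases xs with
    | nil => simp
    | cons y ys => simp [List.tail]
  · simp

-- A's DP final f1, as a pure value
def dpF (mid : Int) : List Int → Int → Int → Int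
  | [], _, f1 => f1
  | x :: xs, f0, f1 =>
    if x ≤ mid then dpF mid xs f1 (max (f0 + 1) f1) else dpF mid xs f1 f1

theorem mg_nonneg (mid : Int) : ∀ n (xs : List Int), xs.length ≤ n → 0 ≤ mg mid xs := by
  intro n
  induction n with
  | zero =>
    intro xs h
    have hx : xs = [] := List.eq_nil_of_length_eq_zero (by omega)
    subst hx; simp [mg]
  | succ n ih =>
    intro xs h
    cases xs with
    | nil => simp [mg]
    | cons x xs =>
      by_cases hx : x ≤ mid
      · have ht := ih xs.tail (by simp [List.length_tail] at *; omega)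
        simp [mg, hx]; omega
      · have ht := ih xs (by simp at h; omega)
        simp [mg, hx]; omega

theorem dpF_ge (mid : Int) (xs : List Int) : ∀ f0 f1, f1 ≤ dpF mid xs f0 f1 := by
  induction xs with
  | nil => intro f0 f1; simp [dpF]
  | cons x xs ih =>
    intro f0 f1
    by_cases hx : x ≤ mid
    · have := ih f1 (max (f0 + 1) f1); simp [dpF, hx]; omega
    · have := ih f1 f1; simp [dpF, hx]; omega

-- the DP from the two reachable state shapes equals the greedy count
theorem dp_eq (mid : Int) : ∀ n (xs : List Int), xs.length ≤ n → ∀ c : Int,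
    dpF mid xs c c = c + mg mid xs ∧ dpF mid xs c (c + 1) = (c + 1) + mg mid xs.tail := by
  intro n
  induction n with
  | zero =>
    intro xs h c
    have hx : xs = [] := List.eq_nil_of_length_eq_zero (by omega)
    subst hx; simp [dpF, mg]
  | succ n ih =>
    intro xs h c
    cases xs with
    | nil => simp [dpF, mg]
    | cons x xs =>
      have hlen : xs.length ≤ n := by simp at h; omega
      constructor
      · by_cases hx : x ≤ mid
        · have hmax : max (c + 1) c = c + 1 := by omega
          have h2 := (ih xs hlen c).2
          simp only [dpF, hx, if_true, hmax, mg]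
          omega
        · have h1 := (ih xs hlen c).1
          simp only [dpF, hx, if_false, mg]
          omega
      · have hmax : max (c + 1) (c + 1) = c + 1 := by omega
        have h1 := (ih xs hlen (c + 1)).1
        by_cases hx : x ≤ mid
        · simp only [dpF, hx, if_true, hmax, List.tail_cons]
          omega
        · simp only [dpF, hx, if_false, List.tail_cons]
          omega

-- early-exit A-check equals the pure DP threshold test
theorem checkA_eq (mid k : Int) (xs : List Int) : ∀ f0 f1, f1 < k →
    checkAgo mid k xs f0 f1 = decide (dpF mid xs f0 f1 < k) := by
  induction xs with
  | nil =>
    intro f0 f1 hf1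
    simp [checkAgo, dpF, hf1]
  | cons x xs ih =>
    intro f0 f1 hf1
    by_cases hx : x ≤ mid
    · by_cases hk2 : k ≤ max (f0 + 1) f1
      · have hge := dpF_ge mid xs f1 (max (f0 + 1) f1)
        simp only [checkAgo, dpF, hx, if_true]
        simp only [hk2, if_true]
        symm; simp; omega
      · simp only [checkAgo, dpF, hx, if_true]
        simp only [hk2, if_false]
        exact ih f1 (max (f0 + 1) f1) (by omega)
    · by_cases hk2 : k ≤ f1
      · omega
      · simp only [checkAgo, dpF, hx, if_false]
        simp only [hk2, if_false]
        exact ih f1 f1 hf1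

theorem checkA_false (mid k : Int) (hk : k ≤ 0) (x : Int) (xs : List Int) :
    checkAgo mid k (x :: xs) 0 0 = false := by
  by_cases hx : x ≤ mid
  · simp only [checkAgo, hx, if_true]
    simp
    intro hgt
    exact absurd hgt (by omega)
  · simp only [checkAgo, hx, if_false]
    simp [hk]

-- A's check, characterised by the greedy count (for nonempty nums, every k)
theorem checkA_cnt (nums : List Int) (k mid : Int) (hne : nums ≠ []) :
    checkA nums k mid = decide (mg mid nums < k) := by
  by_cases hk : 0 < k
  · unfold checkA
    rw [checkA_eq mid k nums 0 0 hk]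
    rw [(dp_eq mid nums.length nums le_rfl 0).1]
    simp
  · cases nums with
    | nil => exact absurd rfl hne
    | cons y ys =>
      unfold checkA
      rw [checkA_false mid k (by omega) y ys]
      have := mg_nonneg mid (y :: ys).length (y :: ys) le_rfl
      symm; simp; omega

-- B's skip-flag scan computes the greedy count
theorem canRobGo_eq (cap : Int) : ∀ n (xs : List Int), xs.length ≤ n → ∀ c : Int,
    canRobGo cap xs false c = c + mg cap xs ∧ canRobGo cap xs true c = c + mg cap xs.tail := by
  intro n
  induction n with
  | zero =>
    intro xs h c
    have hx : xs = [] := List.eq_nil_of_length_eq_zero (by omega)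
    subst hx; simp [canRobGo, mg]
  | succ n ih =>
    intro xs h c
    cases xs with
    | nil => simp [canRobGo, mg]
    | cons x xs =>
      have hlen : xs.length ≤ n := by simp at h; omega
      constructor
      · by_cases hx : x ≤ cap
        · have h2 := (ih xs hlen (c + 1)).2
          simp only [canRobGo, hx, if_true, Bool.false_eq_true, if_false, mg]
          omega
        · have h1 := (ih xs hlen c).1
          simp only [canRobGo, hx, if_false, Bool.false_eq_true, mg]
          omega
      · have h1 := (ih xs hlen c).1
        simp only [canRobGo, if_true, List.tail_cons]
        omega

theorem canRob_cnt (nums : List Int) (k cap : Int) :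
    canRob nums k cap = decide (k ≤ mg cap nums) := by
  unfold canRob
  rw [(canRobGo_eq cap nums.length nums le_rfl 0).1]
  simp

-- at most one more house is robbable with the head present; dropping the head loses at most it
theorem mg_cons (cap x : Int) (xs : List Int) :
    mg cap (x :: xs) = if x ≤ cap then 1 + mg cap xs.tail else mg cap xs := by
  rw [mg]

theorem mg_step (cap : Int) : ∀ n (xs : List Int), xs.length ≤ n → ∀ x : Int,
    mg cap xs ≤ mg cap (x :: xs) ∧ mg cap (x :: xs) ≤ 1 + mg cap xs := by
  intro n
  induction n with
  | zero =>
    intro xs h x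
    have hx : xs = [] := List.eq_nil_of_length_eq_zero (by omega)
    subst hx
    by_cases hc : x ≤ cap <;> simp [mg, hc]
  | succ n ih =>
    intro xs h x
    cases xs with
    | nil => by_cases hc : x ≤ cap <;> simp [mg, hc]
    | cons y ys =>
      have hlen : ys.length ≤ n := by simp at h; omega
      by_cases hc : x ≤ cap
      · have h1 := (ih ys hlen y).1
        have h2 := (ih ys hlen y).2
        rw [mg_cons cap x (y :: ys)]
        simp only [hc, if_true, List.tail_cons]
        exact ⟨h2, by omega⟩
      · rw [mg_cons cap x (y :: ys)]
        simp only [hc, if_false]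
        have := mg_nonneg cap (y :: ys).length (y :: ys) le_rfl
        omega

theorem mg_tail_le (cap : Int) (xs : List Int) : mg cap xs ≤ 1 + mg cap xs.tail := by
  cases xs with
  | nil => simp [mg]
  | cons y ys =>
    have := (mg_step cap ys.length ys le_rfl y).2
    simpa using this

-- the greedy count is monotone in the capability
theorem mg_mono : ∀ n (xs : List Int), xs.length ≤ n → ∀ cap cap' : Int, cap ≤ cap' →
    mg cap xs ≤ mg cap' xs := by
  intro n
  induction n with
  | zero =>
    intro xs h cap cap' _
    have hx : xs = [] := List.eq_nil_of_length_eq_zero (by omega)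
    subst hx; simp [mg]
  | succ n ih =>
    intro xs h cap cap' hcc
    cases xs with
    | nil => simp [mg]
    | cons x xs =>
      have hlen : xs.length ≤ n := by simp at h; omega
      have hlent : xs.tail.length ≤ n := by
        cases xs with
        | nil => simp
        | cons y ys => simp at h ⊢; omega
      by_cases h1 : x ≤ cap
      · have h1' : x ≤ cap' := le_trans h1 hcc
        have := ih xs.tail hlent cap cap' hcc
        simp only [mg, h1, h1', if_true]
        omega
      · by_cases h2 : x ≤ cap'
        · have hmono := ih xs hlen cap cap' hcc
          have hdrop := mg_tail_le cap' xs
          simp only [mg, h1, if_false, h2, if_true]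
          omega
        · have := ih xs hlen cap cap' hcc
          simp only [mg, h1, h2, if_false]
          exact this

-- characterisation of A's closed-interval binary search: least good point in [l, r+1]
theorem loopA_char (nums : List Int) (k : Int) (hne : nums ≠ []) :
    ∀ N (l r : Int), (r + 1 - l).toNat ≤ N → l ≤ r + 1 →
      l ≤ loopA nums k l r ∧ loopA nums k l r ≤ r + 1 ∧
      (∀ m, l ≤ m → m < loopA nums k l r → ¬ (k ≤ mg m nums)) ∧
      (loopA nums k l r ≤ r → k ≤ mg (loopA nums k l r) nums) := by
  intro N
  induction N with
  | zero =>
    intro l r hN hlr1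
    have hlr : ¬ l ≤ r := by omega
    rw [loopA, dif_neg hlr]
    refine ⟨le_refl l, by omega, ?_, by omega⟩
    intro m h1 h2; omega
  | succ N ih =>
    intro l r hN hlr1
    by_cases hlr : l ≤ r
    · have hmid := PySem.Int.floordiv_two_mid_bounds hlr
      set mid := PySem.Int.floordiv (l + r) 2 with hmiddef
      have hchk : checkA nums k mid = decide (mg mid nums < k) := checkA_cnt nums k mid hne
      rw [loopA]
      simp only [hlr, dif_pos, ← hmiddef, hchk]
      by_cases hgood : k ≤ mg mid nums
      · have : decide (mg mid nums < k) = false := by simp; omega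
        rw [this]
        simp only [Bool.false_eq_true, if_false]
        obtain ⟨ih1, ih2, ih3, ih4⟩ := ih l (mid - 1) (by omega) (by omega)
        refine ⟨ih1, by omega, ih3, ?_⟩
        intro hres
        by_cases hcase : loopA nums k l (mid - 1) ≤ mid - 1
        · exact ih4 hcase
        · have : loopA nums k l (mid - 1) = mid := by omega
          rw [this]; exact hgood
      · have : decide (mg mid nums < k) = true := by simp; omega
        rw [this]
        simp only [if_true]
        obtain ⟨ih1, ih2, ih3, ih4⟩ := ih (mid + 1) r (by omega) (by omega)
        refine ⟨by omega, ih2, ?_, ih4⟩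
        intro m h1 h2
        by_cases hm : m ≤ mid
        · intro hgm
          exact hgood (le_trans hgm (mg_mono nums.length nums le_rfl m mid hm))
        · exact ih3 m (by omega) h2
    · rw [loopA, dif_neg hlr]
      refine ⟨le_refl l, by omega, ?_, by omega⟩
      intro m h1 h2; omega

-- characterisation of B's half-open lower-bound search: least good point in [lo, hi]
theorem loopB_char (nums : List Int) (k : Int) :
    ∀ N (lo hi : Int), (hi - lo).toNat ≤ N → lo ≤ hi →
      lo ≤ loopB nums k lo hi ∧ loopB nums k lo hi ≤ hi ∧
      (∀ m, lo ≤ m → m < loopB nums k lo hi → ¬ (k ≤ mg m nums)) ∧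
      (loopB nums k lo hi < hi → k ≤ mg (loopB nums k lo hi) nums) := by
  intro N
  induction N with
  | zero =>
    intro lo hi hN hlh
    have h' : ¬ lo < hi := by omega
    rw [loopB, dif_neg h']
    refine ⟨le_refl lo, hlh, ?_, by omega⟩
    intro m h1 h2; omega
  | succ N ih =>
    intro lo hi hN hlh
    by_cases hlt : lo < hi
    · have hml : lo ≤ PySem.Int.floordiv (lo + hi) 2 :=
        (PySem.Int.le_floordiv_iff_mul_le (by omega)).mpr (by omega)
      have hmr : PySem.Int.floordiv (lo + hi) 2 < hi :=
        (PySem.Int.floordiv_lt_iff_lt_mul (by omega)).mpr (by omega)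
      set mid := PySem.Int.floordiv (lo + hi) 2 with hmiddef
      have hchk : canRob nums k mid = decide (k ≤ mg mid nums) := canRob_cnt nums k mid
      rw [loopB]
      simp only [hlt, dif_pos, ← hmiddef, hchk]
      by_cases hgood : k ≤ mg mid nums
      · have : decide (k ≤ mg mid nums) = true := by simp [hgood]
        rw [this]
        simp only [if_true]
        obtain ⟨ih1, ih2, ih3, ih4⟩ := ih lo mid (by omega) hml
        refine ⟨ih1, by omega, ih3, ?_⟩
        intro _
        by_cases hcase : loopB nums k lo mid < mid
        · exact ih4 hcase
        · have : loopB nums k lo mid = mid := by omega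
          rw [this]; exact hgood
      · have : decide (k ≤ mg mid nums) = false := by simp [hgood]
        rw [this]
        simp only [Bool.false_eq_true, if_false]
        obtain ⟨ih1, ih2, ih3, ih4⟩ := ih (mid + 1) hi (by omega) (by omega)
        refine ⟨by omega, ih2, ?_, ih4⟩
        intro m h1 h2
        by_cases hm : m ≤ mid
        · intro hgm
          exact hgood (le_trans hgm (mg_mono nums.length nums le_rfl m mid hm))
        · exact ih3 m (by omega) h2
    · rw [loopB, dif_neg hlt]
      refine ⟨le_refl lo, hlh, ?_, by omega⟩
      intro m h1 h2; omega

theorem foldl_min_le_init (t : List Int) : ∀ a : Int, t.foldl min a ≤ a := by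
  induction t with
  | nil => intro a; simp
  | cons x xs ih =>
    intro a
    have := ih (min a x)
    simp only [List.foldl_cons]
    omega

theorem init_le_foldl_max (t : List Int) : ∀ a : Int, a ≤ t.foldl max a := by
  induction t with
  | nil => intro a; simp
  | cons x xs ih =>
    intro a
    have := ih (max a x)
    simp only [List.foldl_cons]
    omega

-- ===== VERDICT (by name: the statement is the Claim_ definition above) =====
theorem minCapability_spec : Claim_equal_minCapability := by
  intro nums k _ hpre
  unfold Spec_minCapability minCapability minCapability_alt
  cases nums with
  | nil => exact absurd rfl hpre
  | cons h t =>
    rw [PySem.List.min?_id_cons, PySem.List.max?_id_cons]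
    set l0 := t.foldl min h with hl0
    set m0 := t.foldl max h with hm0
    have hlm : l0 ≤ m0 := le_trans (foldl_min_le_init t h) (init_le_foldl_max t h)
    obtain ⟨a1, a2, a3, a4⟩ :=
      loopA_char (h :: t) k hpre ((m0 + 1 - l0).toNat) l0 m0 le_rfl (by omega)
    obtain ⟨b1, b2, b3, b4⟩ :=
      loopB_char (h :: t) k ((m0 + 1 - l0).toNat) l0 (m0 + 1) le_rfl (by omega)
    set a := loopA (h :: t) k l0 m0
    set b := loopB (h :: t) k l0 (m0 + 1)
    rcases lt_trichotomy a b with hab | hab | hab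
    · exact absurd (a4 (by omega)) (b3 a a1 hab)
    · exact hab
    · exact absurd (b4 (by omega)) (a3 b b1 hab)
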